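-- pv_equiv track=rewrite | github.com/fccc100/Leetcode | 2501-3000/2555-两个线段获得的最多奖品/python-2555/Solution.py | maximizeWin
-- ===== SOURCE A (Python) =====
-- from typing import List
--
-- def maximizeWin(prizePositions: List[int], k: int) -> int:
--     n, l, res = len(prizePositions), 0, 0
--     pre = [0] * (n + 1)
--     for r in range(n):
--         while prizePositions[r] - prizePositions[l] > k:
--             l += 1
--         res = max(res, r - l + 1 + pre[l])
--         pre[r + 1] = max(pre[r], r - l + 1)
--     return res
-- ===== SOURCE B (Python) =====
-- from typing import List
--
-- def maximizeWin(prizePositions: List[int], k: int) -> int: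
--     n = len(prizePositions)
--
--     def left_of(x: int) -> int:
--         # first index i with prizePositions[i] >= x (hand-written bisect_left)
--         lo, hi = 0, n
--         while lo < hi:
--             mid = (lo + hi) // 2
--             if prizePositions[mid] < x:
--                 lo = mid + 1
--             else:
--                 hi = mid
--         return lo
--
--     lefts = [left_of(prizePositions[r] - k) for r in range(n)]
--     win = [r - lefts[r] + 1 for r in range(n)]
--     pm = [0]
--     for i in range(n):
--         pm.append(max(pm[i], win[i]))
--     best = 0
--     for r in range(n):
--         best = max(best, win[r] + pm[lefts[r]])
--     return best
-- ===== Notes on version B (the rewrite author's own statement) =====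
-- stated objective: alternative
-- what changed: Replaces A's single stateful pass (two-pointer left index threaded through one loop that also maintains a running prefix-max array) by a build-tables-then-combine design: a hand-written binary search computes each window's left boundary independently, then a window-size table, its prefix maxima, and a final combining pass produce the answer.
-- outside the precondition, e.g. on maximizeWin([-3, -3, 0, 5, -3], 1): A returns 4, B returns 5
-- crash fix: On a nonempty list with k < 0 A raises IndexError (the two-pointer runs past the end); B returns 0, the correct count for an empty segment. — e.g. on maximizeWin([0], -1): A raises IndexError, B returns 0
import Mathlib
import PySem

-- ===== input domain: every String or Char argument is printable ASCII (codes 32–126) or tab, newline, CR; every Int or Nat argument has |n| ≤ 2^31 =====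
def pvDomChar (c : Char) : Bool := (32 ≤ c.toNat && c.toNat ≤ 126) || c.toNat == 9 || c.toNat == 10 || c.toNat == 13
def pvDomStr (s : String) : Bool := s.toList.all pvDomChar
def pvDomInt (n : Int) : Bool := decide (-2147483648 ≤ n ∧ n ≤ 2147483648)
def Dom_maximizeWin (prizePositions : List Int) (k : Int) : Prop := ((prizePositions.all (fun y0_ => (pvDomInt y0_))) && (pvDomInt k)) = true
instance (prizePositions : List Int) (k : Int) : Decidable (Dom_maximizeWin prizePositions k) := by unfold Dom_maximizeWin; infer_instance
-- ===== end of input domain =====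

-- B replaces A's single stateful two-pointer pass by build-tables-then-combine
-- (binary-search left boundaries, window sizes, prefix maxima, combining pass);
-- same results on sorted input with k ≥ 0 (objective: alternative).

-- ===== PORT A =====
-- the inner `while prizePositions[r] - prizePositions[l] > k: l += 1`
-- (fuel = list length; out-of-range indexing is Python's IndexError, excluded by Pre_)
def pvAdvance (pos : List Int) (k : Int) (r : Nat) : Nat → Nat → Nat
  | l, 0 => l
  | l, fuel+1 =>
    if pos.getD r 0 - pos.getD l 0 > k then pvAdvance pos k r (l+1) fuel else l

def maximizeWin (prizePositions : List Int) (k : Int) : Int :=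
  let n := prizePositions.length
  let st := (List.range n).foldl
    (fun (st : Nat × Int × List Int) (r : Nat) =>
      let l := pvAdvance prizePositions k r st.1 n
      let res := max st.2.1 ((r : Int) - (l : Int) + 1 + st.2.2.getD l 0)
      let pre := st.2.2.set (r+1) (max (st.2.2.getD r 0) ((r : Int) - (l : Int) + 1))
      (l, res, pre))
    (0, 0, List.replicate (n+1) 0)
  st.2.1

-- ===== PORT B =====
-- hand-written bisect_left: `while lo < hi: mid = (lo+hi)//2; ...` (fuel = n suffices)
def pvLeftOf (pos : List Int) (x : Int) : Nat → Nat → Nat → Nat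
  | lo, _, 0 => lo
  | lo, hi, fuel+1 =>
    if lo < hi then
      if pos.getD ((lo + hi) / 2) 0 < x then pvLeftOf pos x ((lo + hi) / 2 + 1) hi fuel
      else pvLeftOf pos x lo ((lo + hi) / 2) fuel
    else lo

def maximizeWin_alt (prizePositions : List Int) (k : Int) : Int :=
  let n := prizePositions.length
  let lefts := (List.range n).map
    (fun r => pvLeftOf prizePositions (prizePositions.getD r 0 - k) 0 n n)
  let win := (List.range n).map (fun (r : Nat) => (r : Int) - ((lefts.getD r 0 : Nat) : Int) + 1)
  let pm := (List.range n).foldl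
    (fun pm i => pm ++ [max (pm.getD i 0) (win.getD i 0)]) [0]
  (List.range n).foldl
    (fun best r => max best (win.getD r 0 + pm.getD (lefts.getD r 0) 0)) 0

-- ===== PRECONDITION & SPEC =====
-- Pre_ restricts to the problem's natural domain (prizePositions sorted non-decreasingly,
-- as LeetCode 2555 guarantees) plus k ≥ 0 unless the list is empty: on unsorted input A's
-- two-pointer state is leftover-accidental (see cites), and on nonempty input with k < 0
-- A raises IndexError (see Raises_ below).
def Pre_maximizeWin (prizePositions : List Int) (k : Int) : Prop :=
  List.Pairwise (· ≤ ·) prizePositions ∧ (0 ≤ k ∨ prizePositions = [])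
instance (prizePositions : List Int) (k : Int) : Decidable (Pre_maximizeWin prizePositions k) := by
  unfold Pre_maximizeWin; infer_instance

def pvWitness_maximizeWin : List Int × Int := ([1, 1, 2, 2, 3, 3, 5], 2)

-- On a nonempty list with k < 0, A raises IndexError (the two-pointer runs past the end);
-- B returns 0, the correct count for an empty segment.
def Raises_maximizeWin (prizePositions : List Int) (k : Int) : Prop :=
  k < 0 ∧ prizePositions ≠ []
instance (prizePositions : List Int) (k : Int) : Decidable (Raises_maximizeWin prizePositions k) := by
  unfold Raises_maximizeWin; infer_instance
def pvRaiseWitness_maximizeWin : List Int × Int := ([0], -1)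
def pvRaiseWitnessOut_maximizeWin : Int := 0

def Spec_maximizeWin (prizePositions : List Int) (k : Int) (out : Int) : Prop := out = maximizeWin_alt prizePositions k
instance (prizePositions : List Int) (k : Int) (out : Int) : Decidable (Spec_maximizeWin prizePositions k out) := by unfold Spec_maximizeWin; infer_instance

-- ===== CLAIM (what is proved, stated in full; the proofs are below) =====
def Claim_equal_maximizeWin : Prop := ∀ (prizePositions : List Int) (k : Int), Dom_maximizeWin prizePositions k → Pre_maximizeWin prizePositions k → Spec_maximizeWin prizePositions k (maximizeWin prizePositions k)

def Claim_raises_maximizeWin : Prop := (∀ (prizePositions : List Int) (k : Int), Dom_maximizeWin prizePositions k → Raises_maximizeWin prizePositions k → ¬ Pre_maximizeWin prizePositions k) ∧ (Dom_maximizeWin (pvRaiseWitness_maximizeWin.1) (pvRaiseWitness_maximizeWin.2) ∧ Raises_maximizeWin (pvRaiseWitness_maximizeWin.1) (pvRaiseWitness_maximizeWin.2) ∧ maximizeWin_alt (pvRaiseWitness_maximizeWin.1) (pvRaiseWitness_maximizeWin.2) = pvRaiseWitnessOut_maximizeWin)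

-- ===== LEMMAS AND PROOFS =====

def pvCnt (pos : List Int) (x : Int) : Nat := pos.countP (fun p => decide (p < x))

theorem pv_sorted_lt_iff (pos : List Int) (h : List.Pairwise (· ≤ ·) pos) (x : Int) :
    ∀ i, i < pos.length → (pos.getD i 0 < x ↔ i < pvCnt pos x) := by
  induction pos with
  | nil => intro i hi; simp at hi
  | cons a t ih =>
    rcases List.pairwise_cons.1 h with ⟨ha, ht⟩
    intro i hi
    cases i with
    | zero =>
      simp only [List.getD_cons_zero, pvCnt, List.countP_cons]
      by_cases hax : a < x
      · simp [hax]
      · have hz : t.countP (fun p => decide (p < x)) = 0 := by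
          rw [List.countP_eq_zero]
          intro b hb
          simp only [decide_eq_true_eq]
          intro hbx
          exact hax (lt_of_le_of_lt (ha b hb) hbx)
        simp [hax, hz]
    | succ i =>
      simp only [List.getD_cons_succ, pvCnt, List.countP_cons]
      have hit : i < t.length := by simpa using hi
      have h2 := ih ht i hit
      simp only [pvCnt] at h2
      by_cases hax : a < x
      · rw [h2]; simp [hax]
      · have hz : t.countP (fun p => decide (p < x)) = 0 := by
          rw [List.countP_eq_zero]
          intro b hb
          simp only [decide_eq_true_eq]
          intro hbx
          exact hax (lt_of_le_of_lt (ha b hb) hbx)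
        have hm : t.getD i 0 ∈ t := by
          rw [List.getD_eq_getElem t 0 hit]; exact List.getElem_mem _
        have hti : ¬ t.getD i 0 < x := fun hlt => hax (lt_of_le_of_lt (ha _ hm) hlt)
        constructor
        · intro hlt; exact absurd hlt hti
        · intro hlt; simp [hz, hax] at hlt

theorem pv_cnt_le_len (pos : List Int) (x : Int) : pvCnt pos x ≤ pos.length := by
  simpa [pvCnt] using List.countP_le_length (l := pos) (p := fun p => decide (p < x))

def pvC (pos : List Int) (k : Int) (r : Nat) : Nat := pvCnt pos (pos.getD r 0 - k)

theorem pv_c_le (pos : List Int) (k : Int) (h : List.Pairwise (· ≤ ·) pos) (hk : 0 ≤ k)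
    (r : Nat) (hr : r < pos.length) : pvC pos k r ≤ r := by
  by_contra hlt
  unfold pvC at hlt
  have hx := (pv_sorted_lt_iff pos h (pos.getD r 0 - k) r hr).2 (by omega)
  omega

theorem pv_sorted_getD_mono (pos : List Int) (h : List.Pairwise (· ≤ ·) pos)
    (i j : Nat) (hij : i ≤ j) (hj : j < pos.length) : pos.getD i 0 ≤ pos.getD j 0 := by
  rcases Nat.lt_or_ge i j with hlt | hge
  · have hi : i < pos.length := lt_trans hlt hj
    rw [List.getD_eq_getElem pos 0 hi, List.getD_eq_getElem pos 0 hj]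
    exact List.pairwise_iff_getElem.1 h i j hi hj hlt
  · have : i = j := le_antisymm hij hge
    subst this; exact le_refl _

theorem pv_c_mono (pos : List Int) (k : Int) (h : List.Pairwise (· ≤ ·) pos)
    (r r' : Nat) (hrr : r ≤ r') (hr' : r' < pos.length) : pvC pos k r ≤ pvC pos k r' := by
  have hx : pos.getD r 0 - k ≤ pos.getD r' 0 - k := by
    have := pv_sorted_getD_mono pos h r r' hrr hr'
    omega
  unfold pvC pvCnt
  apply List.countP_mono_left
  intro b _
  simp only [decide_eq_true_eq]
  intro hb; omega

theorem pv_advance_eq (pos : List Int) (k : Int) (h : List.Pairwise (· ≤ ·) pos)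
    (r : Nat) (_hr : r < pos.length) (hcr : pvC pos k r < pos.length) :
    ∀ fuel l, l ≤ pvC pos k r → pvC pos k r ≤ l + fuel →
      pvAdvance pos k r l fuel = pvC pos k r := by
  have hiff : ∀ i, i < pos.length → (pos.getD i 0 < pos.getD r 0 - k ↔ i < pvC pos k r) :=
    fun i hi => pv_sorted_lt_iff pos h (pos.getD r 0 - k) i hi
  intro fuel
  induction fuel with
  | zero => intro l h1 h2; simp only [pvAdvance]; omega
  | succ fuel ih =>
    intro l h1 h2
    rcases Nat.lt_or_ge l (pvC pos k r) with hlt | hge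
    · have hl : l < pos.length := lt_trans hlt hcr
      have hcond : pos.getD l 0 < pos.getD r 0 - k := (hiff l hl).2 hlt
      simp only [pvAdvance]
      rw [if_pos (by omega)]
      exact ih (l+1) (by omega) (by omega)
    · have hle : l = pvC pos k r := by omega
      have hcond : ¬ pos.getD l 0 < pos.getD r 0 - k := by
        intro hc
        have := (hiff l (hle ▸ hcr)).1 hc
        omega
      simp only [pvAdvance]
      rw [if_neg (by omega)]
      exact hle

theorem pv_leftOf_eq (pos : List Int) (h : List.Pairwise (· ≤ ·) pos) (x : Int) :
    ∀ fuel lo hi, lo ≤ pvCnt pos x → pvCnt pos x ≤ hi → hi ≤ pos.length →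
      hi - lo ≤ fuel → pvLeftOf pos x lo hi fuel = pvCnt pos x := by
  intro fuel
  induction fuel with
  | zero => intro lo hi h1 h2 h3 h4; simp only [pvLeftOf]; omega
  | succ fuel ih =>
    intro lo hi h1 h2 h3 h4
    by_cases hlh : lo < hi
    · have hmid1 : lo ≤ (lo + hi) / 2 := by omega
      have hmid2 : (lo + hi) / 2 < hi := by omega
      have hmidlen : (lo + hi) / 2 < pos.length := by omega
      simp only [pvLeftOf, if_pos hlh]
      by_cases hc : pos.getD ((lo + hi) / 2) 0 < x
      · have hlt := (pv_sorted_lt_iff pos h x _ hmidlen).1 hc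
        rw [if_pos hc]
        exact ih _ hi (by omega) h2 h3 (by omega)
      · have hge : pvCnt pos x ≤ (lo + hi) / 2 := by
          by_contra hno
          exact hc ((pv_sorted_lt_iff pos h x _ hmidlen).2 (by omega))
        rw [if_neg hc]
        exact ih lo _ h1 hge (by omega) (by omega)
    · simp only [pvLeftOf, if_neg hlh]; omega

theorem pv_getD_map_range {α : Type} [Inhabited α] (f : Nat → α) (n r : Nat) (h : r < n) (d : α) :
    ((List.range n).map f).getD r d = f r := by
  have hr : r < ((List.range n).map f).length := by simpa using h
  rw [List.getD_eq_getElem _ d hr]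
  simp

theorem pv_getD_set (xs : List Int) (i j : Nat) (v : Int) :
    (xs.set i v).getD j 0 = if i = j ∧ i < xs.length then v else xs.getD j 0 := by
  by_cases hij : i = j
  · subst hij
    by_cases hil : i < xs.length
    · simp [List.getD_eq_getElem?_getD, hil]
    · have hn : xs[i]? = none := List.getElem?_eq_none (by omega)
      simp [List.getD_eq_getElem?_getD, hil]
  · simp [List.getD_eq_getElem?_getD, hij]

def pvW (pos : List Int) (k : Int) (r : Nat) : Int := (r : Int) - (pvC pos k r : Int) + 1

def pvP (pos : List Int) (k : Int) : Nat → Int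
  | 0 => 0
  | j+1 => max (pvP pos k j) (pvW pos k j)

def pvR (pos : List Int) (k : Int) : Nat → Int
  | 0 => 0
  | r+1 => max (pvR pos k r) (pvW pos k r + pvP pos k (pvC pos k r))

theorem pv_foldA (pos : List Int) (k : Int) (h : List.Pairwise (· ≤ ·) pos) (hk : 0 ≤ k) :
    ∀ r, r ≤ pos.length →
      ∃ l pre,
        (List.range r).foldl
          (fun (st : Nat × Int × List Int) (r : Nat) =>
            let l := pvAdvance pos k r st.1 pos.length
            let res := max st.2.1 ((r : Int) - (l : Int) + 1 + st.2.2.getD l 0)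
            let pre := st.2.2.set (r+1) (max (st.2.2.getD r 0) ((r : Int) - (l : Int) + 1))
            (l, res, pre))
          (0, 0, List.replicate (pos.length+1) 0)
        = (l, pvR pos k r, pre) ∧
        pre.length = pos.length + 1 ∧
        (∀ j, j ≤ r → pre.getD j 0 = pvP pos k j) ∧
        (∀ r', r ≤ r' → r' < pos.length → l ≤ pvC pos k r') := by
  intro r
  induction r with
  | zero =>
    intro _
    refine ⟨0, List.replicate (pos.length+1) 0, rfl, by simp, ?_, fun r' _ _ => Nat.zero_le _⟩
    intro j hj
    interval_cases j
    simp [pvP]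
  | succ r ih =>
    intro hr1
    have hrn : r < pos.length := by omega
    obtain ⟨l, pre, heq, hlen, hpre, hl⟩ := ih (by omega)
    have hcler : pvC pos k r ≤ r := pv_c_le pos k h hk r hrn
    have hadv : pvAdvance pos k r l pos.length = pvC pos k r :=
      pv_advance_eq pos k h r hrn (by omega) pos.length l (hl r (le_refl r) hrn) (by omega)
    refine ⟨pvC pos k r, pre.set (r+1) (max (pre.getD r 0) ((r : Int) - (pvC pos k r : Int) + 1)), ?_, ?_, ?_, ?_⟩
    · rw [List.range_succ, List.foldl_append, heq]
      simp only [List.foldl_cons, List.foldl_nil, hadv]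
      refine Prod.ext rfl (Prod.ext ?_ rfl)
      show max (pvR pos k r) ((r : Int) - (pvC pos k r : Int) + 1 + pre.getD (pvC pos k r) 0)
          = pvR pos k (r+1)
      rw [hpre (pvC pos k r) (by omega)]
      simp [pvR, pvW]
    · simpa using hlen
    · intro j hj
      rw [pv_getD_set]
      rcases Nat.lt_or_ge j (r+1) with hjr | hjr
      · rw [if_neg (by omega)]; exact hpre j (by omega)
      · have hj1 : j = r + 1 := by omega
        subst hj1
        rw [if_pos ⟨rfl, by omega⟩, hpre r (by omega)]
        simp [pvP, pvW]
    · intro r' hrr' hr'n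
      exact pv_c_mono pos k h r r' (by omega) hr'n

theorem maximizeWin_eq_pvR (pos : List Int) (k : Int)
    (h : List.Pairwise (· ≤ ·) pos) (hk : 0 ≤ k) :
    maximizeWin pos k = pvR pos k pos.length := by
  obtain ⟨l, pre, heq, -, -, -⟩ := pv_foldA pos k h hk pos.length (le_refl _)
  simp only [maximizeWin]
  rw [heq]

theorem pv_pm_fold (pos : List Int) (k : Int) (win : List Int)
    (hw : ∀ i, i < pos.length → win.getD i 0 = pvW pos k i) :
    ∀ i, i ≤ pos.length →
      (List.range i).foldl (fun pm j => pm ++ [max (pm.getD j 0) (win.getD j 0)]) [0]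
        = (List.range (i+1)).map (pvP pos k) := by
  intro i
  induction i with
  | zero => intro _; simp [List.range_one, pvP]
  | succ i ih =>
    intro hi
    rw [List.range_succ, List.foldl_append, ih (by omega)]
    simp only [List.foldl_cons, List.foldl_nil]
    rw [pv_getD_map_range (pvP pos k) (i+1) i (by omega), hw i (by omega)]
    rw [List.range_succ (n := i+1), List.map_append]
    rfl

theorem pv_best_fold (pos : List Int) (k : Int)
    (lefts : List Nat) (win pm : List Int)
    (hl : ∀ r, r < pos.length → lefts.getD r 0 = pvC pos k r)
    (hw : ∀ r, r < pos.length → win.getD r 0 = pvW pos k r)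
    (hp : ∀ j, j ≤ pos.length → pm.getD j 0 = pvP pos k j) :
    ∀ r, r ≤ pos.length →
      (List.range r).foldl
        (fun best r => max best (win.getD r 0 + pm.getD (lefts.getD r 0) 0)) 0
      = pvR pos k r := by
  intro r
  induction r with
  | zero => intro _; rfl
  | succ r ih =>
    intro hr
    have hrn : r < pos.length := by omega
    have hcn : pvC pos k r ≤ pos.length := by
      have := pv_cnt_le_len pos (pos.getD r 0 - k)
      simpa [pvC] using this
    rw [List.range_succ, List.foldl_append, ih (by omega)]
    simp only [List.foldl_cons, List.foldl_nil]
    rw [hw r hrn, hl r hrn, hp (pvC pos k r) hcn]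
    simp [pvR]

theorem maximizeWin_alt_eq_pvR (pos : List Int) (k : Int)
    (h : List.Pairwise (· ≤ ·) pos) (_hk : 0 ≤ k) :
    maximizeWin_alt pos k = pvR pos k pos.length := by
  have hcnt : ∀ r, r < pos.length →
      pvLeftOf pos (pos.getD r 0 - k) 0 pos.length pos.length = pvC pos k r := by
    intro r hr
    exact pv_leftOf_eq pos h (pos.getD r 0 - k) pos.length 0 pos.length
      (Nat.zero_le _) (pv_cnt_le_len pos _) (le_refl _) (by omega)
  have hl : ∀ r, r < pos.length →
      ((List.range pos.length).map
        (fun r => pvLeftOf pos (pos.getD r 0 - k) 0 pos.length pos.length)).getD r 0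
        = pvC pos k r := by
    intro r hr
    rw [pv_getD_map_range _ _ _ hr, hcnt r hr]
  simp only [maximizeWin_alt]
  refine pv_best_fold pos k _ _ _ hl ?_ ?_ pos.length (le_refl _)
  · intro r hr
    rw [pv_getD_map_range _ _ _ hr, hl r hr]
    rfl
  · intro j hj
    rw [pv_pm_fold pos k _ ?_ pos.length (le_refl _)]
    · exact pv_getD_map_range (pvP pos k) (pos.length+1) j (by omega) 0
    · intro i hi
      rw [pv_getD_map_range _ _ _ hi, hl i hi]
      rfl

-- ===== VERDICT (by name: the statement is the Claim_ definition above) =====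
theorem maximizeWin_spec : Claim_equal_maximizeWin := by
  intro pos k _ hpre
  unfold Spec_maximizeWin
  rcases hpre with ⟨hs, hk | he⟩
  · rw [maximizeWin_eq_pvR pos k hs hk, maximizeWin_alt_eq_pvR pos k hs hk]
  · subst he; rfl

@[simp]
theorem maximizeWin_raises : Claim_raises_maximizeWin := by
  unfold Claim_raises_maximizeWin
  constructor
  · intro pos k _ hr hpre
    rcases hr with ⟨hk0, hne⟩
    rcases hpre with ⟨_, hk | he⟩
    · omega
    · exact hne he
  · exact ⟨by decide, by decide, by rfl⟩
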